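-- pv_equiv track=rewrite | github.com/alex122-lab/python_basic | Module20/03_function/main.py | borders
-- ===== SOURCE A (Python) =====
-- def borders(list_num, num):
--     if list_num.count(num) == 0:
--         border_beg = 0
--         border_fin = 0
--     elif list_num.count(num) == 1:
--         border_beg = list_num.index(num)
--         border_fin = len(list_num) + 1
--     else:
--         border_beg = list_num.index(num)
--         border_fin = list_num.index(num, border_beg + 1) + 1
--     list_num_border = (i for i in range(border_beg, border_fin))
--     return list_num_border
-- ===== SOURCE B (Python) =====
-- def borders(list_num, num):
--     # one forward pass finding the first two occurrence indices (break after the second)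
--     first = second = None
--     for i, x in enumerate(list_num):
--         if x == num:
--             if first is None:
--                 first = i
--             else:
--                 second = i
--                 break
--     if first is None:
--         beg, fin = 0, 0
--     elif second is None:
--         beg, fin = first, len(list_num) + 1
--     else:
--         beg, fin = first, second + 1
--     return (i for i in range(beg, fin))
-- ===== Notes on version B (the rewrite author's own statement) =====
-- stated objective: alternative
-- what changed: Replaces A's repeated list scans (two count() calls plus up to two index() calls) by a single forward pass that tracks the first two occurrence indices and breaks after the second, then branches on what was found.
import Mathlib
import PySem

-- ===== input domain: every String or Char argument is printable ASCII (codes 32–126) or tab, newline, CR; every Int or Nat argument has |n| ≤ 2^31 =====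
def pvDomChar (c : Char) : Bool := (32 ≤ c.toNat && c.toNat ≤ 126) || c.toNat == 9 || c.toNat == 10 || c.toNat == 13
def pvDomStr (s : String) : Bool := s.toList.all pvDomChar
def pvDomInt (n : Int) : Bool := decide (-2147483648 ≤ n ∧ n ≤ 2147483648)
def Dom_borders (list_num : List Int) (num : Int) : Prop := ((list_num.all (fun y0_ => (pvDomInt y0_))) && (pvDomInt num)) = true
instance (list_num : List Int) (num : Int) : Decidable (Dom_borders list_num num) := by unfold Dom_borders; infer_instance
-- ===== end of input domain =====

-- B replaces A's repeated count()/index() scans with one forward pass that stops at the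
-- second occurrence; same values everywhere (the generator is materialised as a list).

-- ===== PORT A =====
-- A's .index calls are guarded by the count tests, so they never raise; `.getD 0` ports
-- the guaranteed-some index? (the default is unreachable).
def borders (list_num : List Int) (num : Int) : List Int :=
  if PySem.List.count list_num num = 0 then
    PySem.List.pyRange 0 0 1
  else if PySem.List.count list_num num = 1 then
    let border_beg : Int := ((PySem.List.index? list_num num).getD 0 : Nat)
    PySem.List.pyRange border_beg ((list_num.length : Int) + 1) 1
  else
    let border_beg : Int := ((PySem.List.index? list_num num).getD 0 : Nat)
    -- list_num.index(num, border_beg + 1): first match at or after border_beg + 1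
    let border_fin : Int :=
      border_beg + 1 + ((PySem.List.index? (list_num.drop (border_beg.toNat + 1)) num).getD 0 : Nat) + 1
    PySem.List.pyRange border_beg border_fin 1

-- ===== PORT B =====
-- the for-loop of Source B: state = index of the first occurrence (if seen); breaks at the second
def bordersLoop (l : List Int) (num : Int) (i : Int) (first : Option Int) :
    Option Int × Option Int :=
  match l with
  | [] => (first, none)
  | x :: xs =>
    if x = num then
      match first with
      | none => bordersLoop xs num (i + 1) (some i)
      | some f => (some f, some i)
    else bordersLoop xs num (i + 1) first

def borders_alt (list_num : List Int) (num : Int) : List Int :=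
  match bordersLoop list_num num 0 none with
  | (none, _) => PySem.List.pyRange 0 0 1
  | (some f, none) => PySem.List.pyRange f ((list_num.length : Int) + 1) 1
  | (some f, some s) => PySem.List.pyRange f (s + 1) 1

-- ===== PRECONDITION & SPEC =====
def Spec_borders (list_num : List Int) (num : Int) (out : List Int) : Prop := out = borders_alt list_num num
instance (list_num : List Int) (num : Int) (out : List Int) : Decidable (Spec_borders list_num num out) := by unfold Spec_borders; infer_instance

-- ===== CLAIM (what is proved, stated in full; the proofs are below) =====
def Claim_equal_borders : Prop := ∀ (list_num : List Int) (num : Int), Dom_borders list_num num → Spec_borders list_num num (borders list_num num)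

-- ===== LEMMAS AND PROOFS =====

-- once the first occurrence is recorded, the loop returns the next match (if any)
lemma bordersLoop_some (l : List Int) (num : Int) (i f : Int) :
    bordersLoop l num i (some f) =
      (some f, (PySem.List.index? l num).map (fun j : Nat => i + (j : Int))) := by
  induction l generalizing i with
  | nil => simp [bordersLoop, PySem.List.index?]
  | cons x xs ih =>
    by_cases hx : x = num
    · subst hx
      rw [PySem.List.index?_cons_self]
      simp [bordersLoop]
    · rw [PySem.List.index?_cons_of_ne _ hx]
      simp only [bordersLoop, if_neg hx, ih, Option.map_map]
      congr 1
      · cases PySem.List.index? xs num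
        · simp
        · simp [Function.comp]; ring

-- the loop started fresh, characterised by first-occurrence indices
lemma bordersLoop_none (l : List Int) (num : Int) (i : Int) :
    bordersLoop l num i none =
      match PySem.List.index? l num with
      | none => (none, none)
      | some k =>
          (some (i + (k : Int)),
           (PySem.List.index? (l.drop (k + 1)) num).map
             (fun j : Nat => i + (k : Int) + 1 + (j : Int))) := by
  induction l generalizing i with
  | nil => simp [bordersLoop, PySem.List.index?]
  | cons x xs ih =>
    by_cases hx : x = num
    · subst hx
      rw [PySem.List.index?_cons_self]
      simp only [bordersLoop, bordersLoop_some]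
      simp
    · rw [PySem.List.index?_cons_of_ne _ hx]
      simp only [bordersLoop, if_neg hx, ih]
      cases h : PySem.List.index? xs num with
      | none => simp
      | some k =>
        simp only [Option.map_some]
        have : (xs : List Int).drop (k + 1) = (x :: xs).drop (k + 1 + 1) := by simp
        rw [← this]
        cases PySem.List.index? (xs.drop (k + 1)) num
        · simp; omega
        · simp; omega

-- ===== VERDICT (by name: the statement is the Claim_ definition above) =====
theorem borders_spec : Claim_equal_borders := by
  intro list_num num _
  unfold Spec_borders borders borders_alt
  rw [bordersLoop_none]
  cases hidx : PySem.List.index? list_num num with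
  | none =>
    have hc : PySem.List.count list_num num = 0 := by
      rw [PySem.List.count_eq, List.count_eq_zero]
      exact (PySem.List.index?_eq_none_iff _ _).mp hidx
    rw [if_pos hc]
  | some k =>
    obtain ⟨pre, suf, hdecomp, hlen, hnotpre⟩ :=
      (PySem.List.index?_eq_some_iff _ _ _).mp hidx
    have hcount : PySem.List.count list_num num = PySem.List.count suf num + 1 := by
      rw [PySem.List.count_eq, PySem.List.count_eq, hdecomp]
      simp [List.count_append, List.count_eq_zero.mpr hnotpre]
    have hdrop : List.drop (k + 1) list_num = suf := by
      rw [hdecomp, ← hlen, show pre ++ num :: suf = (pre ++ [num]) ++ suf by simp,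
        show pre.length + 1 = (pre ++ [num]).length by simp]
      exact List.drop_left
    have htoNat : ((k : Int)).toNat = k := by simp
    cases hidx2 : PySem.List.index? suf num with
    | none =>
      have hc1 : PySem.List.count list_num num = 1 := by
        rw [hcount, PySem.List.count_eq,
          List.count_eq_zero.mpr ((PySem.List.index?_eq_none_iff _ _).mp hidx2)]
      rw [if_neg (by omega), if_pos hc1]
      simp only [Option.getD_some, zero_add]
      rw [hdrop, hidx2]
      simp only [Option.map_none]
    | some j =>
      have hmem : num ∈ suf :=
        (PySem.List.index?_isSome_iff suf num).mp (by rw [hidx2]; rfl)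
      have hc2 : 1 ≤ PySem.List.count suf num := by
        rw [PySem.List.count_eq]; exact List.one_le_count_iff.mpr hmem
      rw [if_neg (by omega), if_neg (by omega)]
      simp only [Option.getD_some, htoNat]
      rw [hdrop, hidx2]
      simp only [Option.getD_some, Option.map_some, zero_add]
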